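-- pv_equiv track=rewrite | github.com/Ren-97/CodePath2025Summer | week7/def find_cruise_length(cruise_lengths, v.py | is_profitable
-- ===== SOURCE A (Python) =====
-- def is_profitable(excursion_counts):
--     left, right = 0, len(excursion_counts)-1
--     while left <= right:
--         mid = (left + right) // 2
--         count = 0
--         for i in range(len(excursion_counts)-1, -1, -1):
--             if excursion_counts[i] >= mid:
--                 count += 1
--             else:
--                 break
--         if mid == count:
--             return mid
--         elif mid < count:
--             left = mid + 1
--         else:
--             right = mid - 1
--     return -1
-- ===== SOURCE B (Python) =====
-- def is_profitable(excursion_counts):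
--     # Single backward pass: grow the trailing run while its minimum stays >= its length.
--     k = 0
--     m = None
--     for v in reversed(excursion_counts):
--         m = v if m is None or v < m else m
--         if m < k + 1:
--             # run of length k+1 already has an element below k+1: the only
--             # possible answer is k, valid exactly when that element is below k
--             return k if m < k else -1
--         k += 1
--     return -1
-- ===== Notes on version B (the rewrite author's own statement) =====
-- stated objective: alternative
-- what changed: Replaces A's binary search over mid (each probe re-scanning the trailing run from the end) by a single backward pass that grows the trailing run while its running minimum stays >= its length, deciding the unique fixed point directly.
import Mathlib
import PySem

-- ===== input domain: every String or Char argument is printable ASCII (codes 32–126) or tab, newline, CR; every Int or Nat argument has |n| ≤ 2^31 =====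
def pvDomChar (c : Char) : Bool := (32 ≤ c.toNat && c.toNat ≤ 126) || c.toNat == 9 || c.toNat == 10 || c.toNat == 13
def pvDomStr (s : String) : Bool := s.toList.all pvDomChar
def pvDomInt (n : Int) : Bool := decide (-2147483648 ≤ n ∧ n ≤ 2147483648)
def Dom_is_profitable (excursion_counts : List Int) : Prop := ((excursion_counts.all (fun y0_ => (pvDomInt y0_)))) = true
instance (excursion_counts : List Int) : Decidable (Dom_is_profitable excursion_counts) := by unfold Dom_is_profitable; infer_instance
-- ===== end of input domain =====

-- B replaces A's binary search (each probe re-scanning the trailing run) by ONE backward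
-- pass that grows the trailing run while its running minimum stays >= its length.

-- ===== PORT A =====
-- inner 'for i in range(n-1,-1,-1)' with break, as recursion over the index list;
-- pyGetD is exact here: every generated index is in range, so Python never raises
def isProfCount (xs : List Int) (mid : Int) : List Int → Int → Int
  | [], count => count
  | i :: rest, count =>
      if PySem.List.pyGetD xs i 0 ≥ mid then isProfCount xs mid rest (count + 1) else count

def isProfLoop (xs : List Int) (left right : Int) : Int :=
  if h : left ≤ right then
    let mid := PySem.Int.floordiv (left + right) 2
    let count := isProfCount xs mid (PySem.List.pyRange (PySem.List.len xs - 1) (-1) (-1)) 0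
    if mid = count then mid
    else if mid < count then isProfLoop xs (mid + 1) right
    else isProfLoop xs left (mid - 1)
  else -1
termination_by (right + 1 - left).toNat
decreasing_by
  · have := PySem.Int.floordiv_two_mid_bounds h; omega
  · have := PySem.Int.floordiv_two_mid_bounds h; omega

def is_profitable (excursion_counts : List Int) : Int :=
  isProfLoop excursion_counts 0 (PySem.List.len excursion_counts - 1)

-- ===== PORT B =====
def altLoop : Int → Option Int → List Int → Int
  | _, _, [] => -1
  | k, m, v :: rest =>
      let m' := match m with | none => v | some m0 => if v < m0 then v else m0
      if m' < k + 1 then (if m' < k then k else -1)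
      else altLoop (k + 1) (some m') rest

def is_profitable_alt (excursion_counts : List Int) : Int :=
  altLoop 0 none excursion_counts.reverse

-- ===== PRECONDITION & SPEC =====
def Spec_is_profitable (excursion_counts : List Int) (out : Int) : Prop := out = is_profitable_alt excursion_counts
instance (excursion_counts : List Int) (out : Int) : Decidable (Spec_is_profitable excursion_counts out) := by unfold Spec_is_profitable; infer_instance

-- ===== CLAIM (what is proved, stated in full; the proofs are below) =====
def Claim_equal_is_profitable : Prop := ∀ (excursion_counts : List Int), Dom_is_profitable excursion_counts → Spec_is_profitable excursion_counts (is_profitable excursion_counts)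

-- ===== LEMMAS AND PROOFS =====

-- length of the trailing run of xs (= leading run of rs = xs.reverse) of elements ≥ p
def cnt' (rs : List Int) (p : Int) : Int :=
  ((rs.takeWhile (fun v => decide (p ≤ v))).length : Int)

-- the common characterisation: res is the unique fixed point mid = cnt'(mid) in [0, n-1], or -1
def Good (rs : List Int) (res : Int) : Prop :=
  (res = -1 ∧ ∀ p : Int, 0 ≤ p → p ≤ (rs.length : Int) - 1 → cnt' rs p ≠ p) ∨
  (0 ≤ res ∧ res ≤ (rs.length : Int) - 1 ∧ cnt' rs res = res)

lemma cnt'_nonneg (rs : List Int) (p : Int) : 0 ≤ cnt' rs p := by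
  simp [cnt']

lemma cnt'_anti (rs : List Int) {p q : Int} (h : p ≤ q) : cnt' rs q ≤ cnt' rs p := by
  unfold cnt'
  induction rs with
  | nil => simp
  | cons a t ih =>
      by_cases hq : q ≤ a
      · have hp : p ≤ a := le_trans h hq
        simpa [List.takeWhile_cons, hq, hp] using ih
      · by_cases hp : p ≤ a
        · simp [hq, hp]; positivity
        · simp [hq, hp]

lemma good_unique {rs : List Int} {r1 r2 : Int} (h1 : Good rs r1) (h2 : Good rs r2) :
    r1 = r2 := by
  rcases h1 with ⟨e1, n1⟩ | ⟨b1, u1, f1⟩ <;> rcases h2 with ⟨e2, n2⟩ | ⟨b2, u2, f2⟩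
  · omega
  · exact absurd f2 (n1 _ b2 u2)
  · exact absurd f1 (n2 _ b1 u1)
  · by_contra hne
    rcases lt_or_gt_of_ne hne with hlt | hlt
    · have := cnt'_anti rs (le_of_lt hlt); omega
    · have := cnt'_anti rs (le_of_lt hlt); omega

-- A's inner loop computes cnt' of the reversed prefix
lemma isProfCount_eq (xs : List Int) (mid : Int) :
    ∀ j : Nat, j ≤ xs.length → ∀ c : Int,
      isProfCount xs mid (PySem.List.pyRange ((j : Int) - 1) (-1) (-1)) c
        = c + cnt' ((xs.take j).reverse) mid := by
  intro j
  induction j with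
  | zero => intro _ c; rw [PySem.List.pyRange_neg_one_eq_nil (by omega)]; simp [isProfCount, cnt']
  | succ j ih =>
      intro hj c
      have hjlen : j < xs.length := by omega
      rw [show ((j + 1 : Nat) : Int) - 1 = (j : Int) by push_cast; ring,
          PySem.List.pyRange_neg_one_cons (by omega)]
      have htake : (xs.take (j + 1)).reverse = xs[j] :: (xs.take j).reverse := by
        rw [List.take_succ_eq_append_getElem hjlen]; simp
      simp only [isProfCount]
      rw [PySem.List.pyGetD_natCast, List.getD_eq_getElem _ _ hjlen]
      by_cases hge : xs[j] ≥ mid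
      · rw [if_pos hge, ih (by omega) (c + 1), htake]
        simp [cnt', show mid ≤ xs[j] from hge]
        ring
      · rw [if_neg hge, htake]
        simp [cnt', show ¬ mid ≤ xs[j] from hge]

lemma count_full (xs : List Int) (mid : Int) :
    isProfCount xs mid (PySem.List.pyRange ((xs.length : Int) - 1) (-1) (-1)) 0
      = cnt' xs.reverse mid := by
  have := isProfCount_eq xs mid xs.length le_rfl 0
  simpa using this

-- binary-search correctness for A's outer loop
lemma isProfLoop_good (xs : List Int) :
    ∀ n : Nat, ∀ l r : Int, (r + 1 - l).toNat = n → 0 ≤ l → r ≤ (xs.length : Int) - 1 →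
      (∀ p : Int, 0 ≤ p → p ≤ (xs.length : Int) - 1 → cnt' xs.reverse p = p → l ≤ p ∧ p ≤ r) →
      Good xs.reverse (isProfLoop xs l r) := by
  intro n
  induction n using Nat.strong_induction_on with
  | _ n ih =>
      intro l r hn hl hr hinv
      rw [isProfLoop]
      by_cases hlr : l ≤ r
      · rw [dif_pos hlr]
        have hmid := PySem.Int.floordiv_two_mid_bounds hlr
        set mid := PySem.Int.floordiv (l + r) 2 with hmiddef
        have hcnt : isProfCount xs mid (PySem.List.pyRange (PySem.List.len xs - 1) (-1) (-1)) 0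
            = cnt' xs.reverse mid := by
          rw [PySem.List.len_eq]; exact count_full xs mid
        simp only [hcnt]
        by_cases heq : mid = cnt' xs.reverse mid
        · rw [if_pos heq]
          right
          have hrev : (xs.reverse.length : Int) = (xs.length : Int) := by simp
          exact ⟨by omega, by omega, heq.symm⟩
        · rw [if_neg heq]
          by_cases hlt : mid < cnt' xs.reverse mid
          · rw [if_pos hlt]
            refine ih (r + 1 - (mid + 1)).toNat (by omega) (mid + 1) r rfl (by omega) hr ?_
            intro p hp0 hpn hfix
            have hold := hinv p hp0 hpn hfix
            constructor
            · by_contra hc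
              have hple : p ≤ mid := by omega
              have := cnt'_anti xs.reverse hple
              omega
            · exact hold.2
          · rw [if_neg hlt]
            refine ih (mid - 1 + 1 - l).toNat (by omega) l (mid - 1) rfl hl (by omega) ?_
            intro p hp0 hpn hfix
            have hold := hinv p hp0 hpn hfix
            constructor
            · exact hold.1
            · by_contra hc
              have hple : mid ≤ p := by omega
              have := cnt'_anti xs.reverse hple
              omega
      · rw [dif_neg hlr]
        left
        refine ⟨rfl, ?_⟩
        intro p hp0 hpn hfix
        have := hinv p hp0 (by simpa [List.length_reverse] using hpn) hfix
        omega

lemma a_good (xs : List Int) : Good xs.reverse (is_profitable xs) := by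
  unfold is_profitable
  rw [PySem.List.len_eq]
  refine isProfLoop_good xs _ 0 ((xs.length : Int) - 1) rfl le_rfl le_rfl ?_
  intro p hp0 hpn _
  exact ⟨hp0, hpn⟩

-- B's one-pass loop satisfies the same characterisation
lemma prefix_all_of_le_cnt' {rs : List Int} {p : Int} {j : Nat}
    (h : (j : Int) ≤ cnt' rs p) : ∀ x ∈ rs.take j, p ≤ x := by
  intro x hx
  have hpre := List.takeWhile_prefix (l := rs) (fun v => decide (p ≤ v))
  have hj : j ≤ (rs.takeWhile (fun v => decide (p ≤ v))).length := by
    unfold cnt' at h; exact_mod_cast h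
  have htk : rs.take j = (rs.takeWhile (fun v => decide (p ≤ v))).take j := by
    rw [List.prefix_iff_eq_take.mp hpre, List.take_take, Nat.min_eq_left hj]
  rw [htk] at hx
  have := List.mem_takeWhile_imp (List.mem_of_mem_take hx)
  simpa using this

lemma altLoop_good (rs : List Int) :
    ∀ rest pre : List Int, rs = pre ++ rest →
      (∀ x ∈ pre, (pre.length : Int) ≤ x) →
      ∀ m : Option Int,
      ((pre = [] ∧ m = none) ∨ (∃ m0, m = some m0 ∧ m0 ∈ pre ∧ ∀ x ∈ pre, m0 ≤ x)) →
      Good rs (altLoop (pre.length : Int) m rest) := by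
  intro rest
  induction rest with
  | nil =>
      intro pre hrs hinv m _
      simp only [altLoop]
      left
      refine ⟨rfl, ?_⟩
      intro p hp0 hpn
      have hall : ∀ x ∈ rs, p ≤ x := by
        intro x hx
        have : (rs.length : Int) ≤ x := by
          subst hrs; simpa using hinv x (by simpa using hx)
        omega
      have : rs.takeWhile (fun v => decide (p ≤ v)) = rs :=
        List.takeWhile_eq_self_iff.mpr (by intro x hx; simpa using hall x hx)
      unfold cnt'; rw [this]; omega
  | cons v rest' ihr =>
      intro pre hrs hinv m hm
      simp only [altLoop]
      -- m' is the minimum of pre ++ [v]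
      set m' := (match m with | none => v | some m0 => if v < m0 then v else m0) with hm'def
      have hmin : m' ∈ pre ++ [v] ∧ ∀ x ∈ pre ++ [v], m' ≤ x := by
        rcases hm with ⟨hpre, hmn⟩ | ⟨m0, hms, hmem, hle⟩
        · subst hpre; subst hmn; simp [hm'def]
        · subst hms
          simp only [hm'def]
          by_cases hv : v < m0
          · rw [if_pos hv]
            refine ⟨by simp, ?_⟩
            intro x hx
            rcases List.mem_append.mp hx with hx | hx
            · exact le_trans (le_of_lt hv) (hle x hx)
            · simp at hx; omega
          · rw [if_neg hv]
            refine ⟨by simp [hmem], ?_⟩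
            intro x hx
            rcases List.mem_append.mp hx with hx | hx
            · exact hle x hx
            · simp at hx; omega
      by_cases hbrk : m' < (pre.length : Int) + 1
      · rw [if_pos hbrk]
        have hvm : m' = v ∨ m' ∈ pre := by
          rcases List.mem_append.mp hmin.1 with h | h
          · right; exact h
          · left; simpa using h
        by_cases hret : m' < (pre.length : Int)
        · -- returns k = pre.length : it is the fixed point
          rw [if_pos hret]
          right
          have hvval : m' = v := by
            rcases hvm with h | h
            · exact h
            · exact absurd (hinv _ h) (by omega)
          have hlen : pre.length < rs.length := by subst hrs; simp
          refine ⟨by positivity, by omega, ?_⟩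
          -- cnt' rs pre.length = pre.length : pre all ≥ |pre|, and v < |pre| stops the run
          have hallpre : ∀ x ∈ pre, (decide (((pre.length : Int)) ≤ x)) = true := by
            intro x hx; simpa using hinv x hx
          unfold cnt'
          subst hrs
          rw [List.takeWhile_append_of_pos hallpre]
          have : ¬ ((pre.length : Int) ≤ v) := by omega
          simp [this]
        · -- m' = pre.length : no fixed point exists at all
          rw [if_neg hret]
          left
          refine ⟨rfl, ?_⟩
          intro p hp0 hpn hfix
          have hm'eq : m' = (pre.length : Int) := by omega
          by_cases hple : p ≤ (pre.length : Int)
          · -- first |pre|+1 elements all ≥ pre.length ≥ p, so cnt' > p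
            have hallp : ∀ x ∈ pre ++ [v], (decide (p ≤ x)) = true := by
              intro x hx
              have := hmin.2 x hx
              simp; omega
            have : cnt' rs p = (pre.length : Int) + 1 + cnt' rest' p := by
              unfold cnt'
              subst hrs
              rw [show pre ++ v :: rest' = (pre ++ [v]) ++ rest' by simp,
                  List.takeWhile_append_of_pos hallp]
              simp; ring
            have := cnt'_nonneg rest' p
            omega
          · -- p > pre.length: the run stops at m' (position ≤ pre.length) < p
            have hgt : (pre.length : Int) < p := by omega
            have hcle : cnt' rs p ≤ (pre.length : Int) := by
              by_contra hc
              have hge : ((pre.length + 1 : Nat) : Int) ≤ cnt' rs p := by omega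
              have hall := prefix_all_of_le_cnt' hge
              have hmemtk : m' ∈ rs.take (pre.length + 1) := by
                subst hrs
                rw [show pre ++ v :: rest' = (pre ++ [v]) ++ rest' by simp,
                    List.take_append_of_le_length (by simp), List.take_of_length_le (by simp)]
                exact hmin.1
              have := hall m' hmemtk
              omega
            omega
      · -- continue: pre grows by v
        rw [if_neg hbrk]
        have hstep : ((pre ++ [v]).length : Int) = (pre.length : Int) + 1 := by simp
        have := ihr (pre ++ [v]) (by simp [hrs]) ?_ (some m') ?_
        · simpa [hstep] using this
        · intro x hx
          have := hmin.2 x hx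
          simp only [List.length_append, List.length_cons, List.length_nil]
          push_cast; omega
        · right; exact ⟨m', rfl, hmin.1, hmin.2⟩

lemma b_good (xs : List Int) : Good xs.reverse (is_profitable_alt xs) := by
  unfold is_profitable_alt
  have := altLoop_good xs.reverse xs.reverse [] (by simp) (by simp) none (by simp)
  simpa using this

-- ===== VERDICT (by name: the statement is the Claim_ definition above) =====
theorem is_profitable_spec : Claim_equal_is_profitable := by
  intro xs _
  unfold Spec_is_profitable
  exact good_unique (a_good xs) (b_good xs)
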